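-- pv_equiv track=rewrite | github.com/siberder/bot | utils.py | checkWordsInText
-- ===== SOURCE A (Python) =====
-- def checkWordsInText(text, words):
-- 	# Lower all words
-- 	textlines = text.split("\n")
-- 	textfrags = []
-- 	[textfrags.extend(l.split(" ")) for l in textlines]
-- 	text = [w.lower() for w in textfrags]
-- 	words = [w.lower() for w in words]
--
-- 	for w in words:
-- 		if w in text:
-- 			return w
--
-- 	return None
-- ===== SOURCE B (Python) =====
-- def checkWordsInText(text, words):
-- 	# Index each lowercased query word by its first position, then scan the
-- 	# text tokens once, keeping the smallest matching query index.
-- 	idx = {}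
-- 	i = 0
-- 	for w in words:
-- 		lw = w.lower()
-- 		if lw not in idx:
-- 			idx[lw] = i
-- 		i += 1
--
-- 	best = None
-- 	for line in text.split("\n"):
-- 		for tok in line.split(" "):
-- 			j = idx.get(tok.lower())
-- 			if j is not None and (best is None or j < best):
-- 				best = j
--
-- 	return None if best is None else words[best].lower()
-- ===== Notes on version B (the rewrite author's own statement) =====
-- stated objective: alternative
-- what changed: A loops over the query words testing each for membership in the full token list; B reverses the traversal: it builds a dict from each lowercased query word to its first index once, then scans the text tokens a single time keeping the smallest matching query index, returning that word (or None).
import Mathlib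
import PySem

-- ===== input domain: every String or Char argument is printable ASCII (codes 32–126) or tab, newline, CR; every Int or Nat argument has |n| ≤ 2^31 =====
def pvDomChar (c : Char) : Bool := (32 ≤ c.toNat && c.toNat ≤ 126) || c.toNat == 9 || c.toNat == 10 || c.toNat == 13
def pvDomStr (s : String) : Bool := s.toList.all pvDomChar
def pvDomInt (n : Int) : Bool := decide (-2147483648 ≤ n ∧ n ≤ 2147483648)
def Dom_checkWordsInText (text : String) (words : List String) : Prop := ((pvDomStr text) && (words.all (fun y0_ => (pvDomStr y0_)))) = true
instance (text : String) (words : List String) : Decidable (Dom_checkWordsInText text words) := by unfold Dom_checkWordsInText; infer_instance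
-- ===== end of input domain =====

-- B replaces A's per-query-word membership scan of the token list by a one-pass scan of the
-- tokens against a first-index table of the query words (alternative decomposition, same result).


-- shared primitive: Python's s.split(sep) for a non-empty literal sep (split? is none only for sep = "")
def pySplit (s sep : String) : List String := (PySem.Str.split? s sep).getD []

-- ===== PORT A =====
-- 'for w in words: if w in text: return w / return None'
def pvAFind : List String → List String → Option String
  | [], _ => none
  | w :: ws, t => if t.contains w then some w else pvAFind ws t

def checkWordsInText (text : String) (words : List String) : Option String :=
  let textlines := pySplit text "\n"
  let textfrags := textlines.foldl (fun acc l => acc ++ pySplit l " ") []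
  let textL := textfrags.map PySem.Str.lower
  let wordsL := words.map PySem.Str.lower
  pvAFind wordsL textL

-- ===== PORT B =====
-- 'for w in words: lw = w.lower(); if lw not in idx: idx[lw] = i; i += 1'
def pvBBuild : List String → Nat → PySem.Dict String Nat → PySem.Dict String Nat
  | [], _, d => d
  | w :: ws, i, d =>
      let lw := PySem.Str.lower w
      pvBBuild ws (i + 1) (if d.contains lw then d else d.insert lw i)

-- 'j = idx.get(tok.lower()); if j is not None and (best is None or j < best): best = j'
def pvBStep (d : PySem.Dict String Nat) (best : Option Nat) (tok : String) : Option Nat :=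
  match d.get? (PySem.Str.lower tok), best with
  | some j, none => some j
  | some j, some b => if j < b then some j else some b
  | none, b => b

def checkWordsInText_alt (text : String) (words : List String) : Option String :=
  let idx := pvBBuild words 0 PySem.Dict.empty
  let best := (pySplit text "\n").foldl
      (fun b line => (pySplit line " ").foldl (pvBStep idx) b) none
  match best with
  | none => none
  | some j => (PySem.List.pyGet? words (j : Int)).map PySem.Str.lower

-- ===== PRECONDITION & SPEC =====
def Spec_checkWordsInText (text : String) (words : List String) (out : Option String) : Prop := out = checkWordsInText_alt text words
instance (text : String) (words : List String) (out : Option String) : Decidable (Spec_checkWordsInText text words out) := by unfold Spec_checkWordsInText; infer_instance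

-- ===== CLAIM (what is proved, stated in full; the proofs are below) =====
def Claim_equal_checkWordsInText : Prop := ∀ (text : String) (words : List String), Dom_checkWordsInText text words → Spec_checkWordsInText text words (checkWordsInText text words)

-- ===== LEMMAS AND PROOFS =====

-- the minimum index among ws of a word occurring (lowercased) in the token list ts
def pvM (ws ts : List String) : Option Nat :=
  ws.findIdx? (fun w => (ts.map PySem.Str.lower).contains w)

theorem pvMerge_assoc (a b c : Option Nat) :
    Option.merge min (Option.merge min a b) c = Option.merge min a (Option.merge min b c) := by
  cases a <;> cases b <;> cases c <;> simp [Option.merge, Nat.min_assoc]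

theorem pvFindIdxOr (l : List String) (p q : String → Bool) :
    Option.merge min (l.findIdx? p) (l.findIdx? q) = l.findIdx? (fun x => p x || q x) := by
  induction l with
  | nil => simp [Option.merge]
  | cons x xs ih =>
    by_cases hp : p x = true <;> by_cases hq : q x = true <;>
      simp [List.findIdx?_cons, hp, hq]
    · cases xs.findIdx? q <;> simp [Option.merge]
    · cases xs.findIdx? p <;> simp [Option.merge]
    · rw [← ih]
      cases xs.findIdx? p <;> cases xs.findIdx? q <;>
        simp [Option.merge, Nat.min_def]
      split_ifs <;> omega

theorem pvBStep_eq (d : PySem.Dict String Nat) (b : Option Nat) (t : String) :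
    pvBStep d b t = Option.merge min b (d.get? (PySem.Str.lower t)) := by
  cases h : d.get? (PySem.Str.lower t) <;> cases b <;>
    simp [pvBStep, h, Option.merge]
  rw [Nat.min_comm, Nat.min_def]
  split_ifs <;> (first | rfl | (congr 1; omega))

theorem pvBBuild_get (vs : List String) (i : Nat) (d : PySem.Dict String Nat) (k : String) :
    (pvBBuild vs i d).get? k =
      (d.get? k).or ((vs.findIdx? (fun w => PySem.Str.lower w == k)).map (· + i)) := by
  induction vs generalizing i d with
  | nil => simp [pvBBuild]
  | cons w ws ih =>
    simp only [pvBBuild, ih, List.findIdx?_cons]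
    by_cases hk : PySem.Str.lower w = k
    · subst hk
      by_cases hc : d.contains (PySem.Str.lower w) = true
      · have hs : (d.get? (PySem.Str.lower w)).isSome = true := by
          rw [← PySem.Dict.contains_eq_isSome_get?]; exact hc
        obtain ⟨v, hv⟩ := Option.isSome_iff_exists.mp hs
        simp [hc, hv]
      · have hcb : d.contains (PySem.Str.lower w) = false := by simpa using hc
        have hnone : d.get? (PySem.Str.lower w) = none := by
          have h := PySem.Dict.contains_eq_isSome_get? (d := d) (k := PySem.Str.lower w)
          rw [hcb] at h
          exact Option.not_isSome_iff_eq_none.mp (by rw [← h]; simp)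
        simp [hc, hnone, PySem.Dict.get?_insert_self]
    · have hbeq : (PySem.Str.lower w == k) = false := by simp [hk]
      have hget : (if d.contains (PySem.Str.lower w) = true then d
          else d.insert (PySem.Str.lower w) i).get? k = d.get? k := by
        split_ifs with hc
        · rfl
        · exact PySem.Dict.get?_insert_of_ne d i (fun h => hk h.symm)
      rw [hget, hbeq]
      simp only [Bool.false_eq_true, if_false]
      congr 1
      cases ws.findIdx? (fun w => PySem.Str.lower w == k) <;> simp
      omega

theorem pvScan (ws ts : List String) (b : Option Nat) (g : String → Option Nat)
    (hg : ∀ t, g t = ws.findIdx? (fun w => w == PySem.Str.lower t)) :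
    ts.foldl (fun b t => Option.merge min b (g t)) b = Option.merge min b (pvM ws ts) := by
  induction ts generalizing b with
  | nil =>
    have h0 : pvM ws [] = none := by
      rw [pvM, List.findIdx?_eq_none_iff]; intro x _; simp
    rw [List.foldl_nil, h0]
    cases b <;> simp [Option.merge]
  | cons t ts ih =>
    simp only [List.foldl_cons, ih, pvMerge_assoc]
    congr 1
    rw [hg, pvM, pvM, pvFindIdxOr]
    congr 1

theorem pvAFind_eq (ws t : List String) :
    pvAFind ws t = (ws.findIdx? (fun w => t.contains w)).map (fun i => ws.getD i "") := by
  induction ws with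
  | nil => simp [pvAFind]
  | cons w ws ih =>
    by_cases hw : w ∈ t
    · simp [pvAFind, List.findIdx?_cons, hw]
    · simp only [pvAFind, List.findIdx?_cons, ih]
      simp only [List.contains_eq_mem, hw, decide_false]
      cases ws.findIdx? (fun w => decide (w ∈ t)) <;> simp

-- ===== VERDICT (by name: the statement is the Claim_ definition above) =====
theorem checkWordsInText_spec : Claim_equal_checkWordsInText := by
  intro text words _
  unfold Spec_checkWordsInText checkWordsInText checkWordsInText_alt
  simp only []
  -- normalize A's fragment accumulation and B's nested loop to the flat token list
  have hfrags : (pySplit text "\n").foldl (fun acc l => acc ++ pySplit l " ") [] =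
      (pySplit text "\n").flatMap (fun l => pySplit l " ") := by
    rw [PySem.List.foldl_append_eq_flatMap]; simp
  set frags := (pySplit text "\n").flatMap (fun l => pySplit l " ") with hfragsdef
  have hnested : (pySplit text "\n").foldl
      (fun b line => (pySplit line " ").foldl (pvBStep (pvBBuild words 0 PySem.Dict.empty)) b) none =
      frags.foldl (pvBStep (pvBBuild words 0 PySem.Dict.empty)) none := by
    rw [hfragsdef, List.foldl_flatMap]
  rw [hfrags, hnested]
  set ws := words.map PySem.Str.lower with hws
  -- the dict lookup is the first index in ws
  have hget : ∀ k, (pvBBuild words 0 PySem.Dict.empty).get? k =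
      ws.findIdx? (fun w => w == k) := by
    intro k
    rw [pvBBuild_get]
    simp only [PySem.Dict.get?_empty, Option.none_or, hws, List.findIdx?_map]
    cases h : words.findIdx? ((fun w => w == k) ∘ PySem.Str.lower) with
    | none => rw [show (fun w => PySem.Str.lower w == k) = ((fun w => w == k) ∘ PySem.Str.lower)
        from rfl, h]; rfl
    | some j => rw [show (fun w => PySem.Str.lower w == k) = ((fun w => w == k) ∘ PySem.Str.lower)
        from rfl, h]; simp
  -- B's scan computes the minimum matching index
  have hscan : frags.foldl (pvBStep (pvBBuild words 0 PySem.Dict.empty)) none = pvM ws frags := by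
    have hfun : pvBStep (pvBBuild words 0 PySem.Dict.empty) =
        fun b t => Option.merge min b
          ((pvBBuild words 0 PySem.Dict.empty).get? (PySem.Str.lower t)) := by
      funext b t; exact pvBStep_eq _ b t
    rw [hfun, pvScan ws frags none _ (fun t => hget (PySem.Str.lower t))]
    cases pvM ws frags <;> simp [Option.merge]
  rw [hscan, pvAFind_eq]
  unfold pvM
  cases h : ws.findIdx? (fun w => (frags.map PySem.Str.lower).contains w) with
  | none => simp
  | some j =>
    have hj : j < ws.length := (List.findIdx?_eq_some_iff_findIdx_eq.mp h).1
    have hjw : j < words.length := by simpa [hws] using hj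
    simp only [Option.map_some]
    rw [show ((j : Nat) : Int) = ((j : Nat) : Int) from rfl, PySem.List.pyGet?_natCast]
    rw [List.getElem?_eq_getElem hjw]
    simp [hws, List.getD_eq_getElem?_getD, List.getElem?_eq_getElem hjw, List.getElem?_map]
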